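-- pv_equiv track=rewrite | github.com/ToxicDev-Patryk/Encrypted-Messenger | main.py | custom_encrypt
-- ===== SOURCE A (Python) =====
-- def generate_key_schedule(key):
--     key_schedule = []
--     for i in range(len(key)):
--         key_schedule.append(ord(key[i]) + i)
--     for i in range(len(key), 256):
--         key_schedule.append((key_schedule[i - len(key)] + key_schedule[i - 1]) % 256)
--     return key_schedule
--
-- def custom_encrypt(plaintext, key):
--     key_schedule = generate_key_schedule(key)
--     encrypted = []
--     for round in range(3):
--         temp = []
--         for i, char in enumerate(plaintext):
--             key_c = key_schedule[(i + round) % len(key_schedule)]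
--             plaintext_c = ord(char)
--             temp.append(chr((plaintext_c ^ key_c) % 256))
--         plaintext = ''.join(temp)
--     encrypted = plaintext[::-1]
--     return encrypted
-- ===== SOURCE B (Python) =====
-- def generate_key_schedule(key):
--     key_schedule = []
--     for i in range(len(key)):
--         key_schedule.append(ord(key[i]) + i)
--     for i in range(len(key), 256):
--         key_schedule.append((key_schedule[i - len(key)] + key_schedule[i - 1]) % 256)
--     return key_schedule
--
-- def custom_encrypt(plaintext, key):
--     ks = generate_key_schedule(key)
--     L = len(ks)
--     comb = [(ks[i] ^ ks[(i + 1) % L] ^ ks[(i + 2) % L]) & 255 for i in range(L)]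
--     stream = comb * (len(plaintext) // L + 1)
--     out = [chr((o ^ c) & 255) for o, c in zip(map(ord, plaintext), stream)]
--     out.reverse()
--     return ''.join(out)
-- ===== Notes on version B (the rewrite author's own statement) =====
-- stated objective: faster
-- what changed: Replaces the three sequential encryption rounds (each rebuilding the whole string) by a single pass that XORs each character with the precomputed threefold XOR of the three schedule entries the rounds would use, then reverses.
import Mathlib
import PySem

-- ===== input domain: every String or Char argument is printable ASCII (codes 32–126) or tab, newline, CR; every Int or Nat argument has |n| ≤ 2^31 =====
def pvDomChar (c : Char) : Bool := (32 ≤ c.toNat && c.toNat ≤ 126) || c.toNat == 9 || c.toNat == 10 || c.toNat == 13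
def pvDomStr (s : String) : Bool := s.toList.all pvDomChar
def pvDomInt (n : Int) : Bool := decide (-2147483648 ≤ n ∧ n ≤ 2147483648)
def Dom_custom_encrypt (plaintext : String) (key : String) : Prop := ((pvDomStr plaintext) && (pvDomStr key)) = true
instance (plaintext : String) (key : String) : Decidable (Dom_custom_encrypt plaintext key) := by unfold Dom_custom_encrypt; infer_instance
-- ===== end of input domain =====

-- B replaces A's three sequential XOR rounds by one pass using the precomputed
-- threefold XOR of the schedule entries (objective: faster, constant factor).

-- ===== PORT A =====
-- All values are nonnegative Python ints; ported as Nat.  Indices are nonnegative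
-- and the moduli are positive, so Nat `%`, `-` and `getD` are exact here.
def generate_key_schedule (key : String) : List Nat :=
  let n := key.toList.length
  let ks := (List.range n).foldl
    (fun acc i => acc ++ [(key.toList.getD i 'a').toNat + i]) []
  (List.range' n (256 - n)).foldl
    (fun acc i => acc ++ [(acc.getD (i - n) 0 + acc.getD (i - 1) 0) % 256]) ks

-- one round: `for i, char in enumerate(plaintext): temp.append(chr((ord(char) ^ ks[(i+round)%len(ks)]) % 256))`
-- (enumerate ported with Nat indices via zipIdx: exact, indices are nonnegative)
def encRound (ks : List Nat) (r : Nat) (pt : List Char) : List Char :=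
  pt.zipIdx.foldl
    (fun acc ci => acc ++ [Char.ofNat ((ci.1.toNat ^^^ ks.getD ((ci.2 + r) % ks.length) 0) % 256)]) []

def custom_encrypt (plaintext : String) (key : String) : String :=
  let ks := generate_key_schedule key
  let p1 := encRound ks 0 plaintext.toList
  let p2 := encRound ks 1 p1
  let p3 := encRound ks 2 p2
  String.mk p3.reverse

-- ===== PORT B =====
-- comb = the 3-fold XOR table; stream = comb * (len(plaintext)//L + 1) (list repetition
-- ported as flatten of replicate); indices in the comprehensions are in range, so getD is exact
def custom_encrypt_alt (plaintext : String) (key : String) : String :=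
  let ks := generate_key_schedule key
  let L := ks.length
  let comb := (List.range L).map
    (fun i => (ks.getD i 0 ^^^ ks.getD ((i + 1) % L) 0 ^^^ ks.getD ((i + 2) % L) 0) &&& 255)
  let stream := (List.replicate (plaintext.toList.length / L + 1) comb).flatten
  let out := ((plaintext.toList.map Char.toNat).zip stream).map
    (fun oc => Char.ofNat ((oc.1 ^^^ oc.2) &&& 255))
  String.mk out.reverse

-- ===== PRECONDITION & SPEC =====
-- Pre_ excludes only key = "", on which the Python A raises IndexError while
-- building the key schedule (B's schedule construction raises there too).
def Pre_custom_encrypt (plaintext : String) (key : String) : Prop := key ≠ ""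
instance (plaintext : String) (key : String) : Decidable (Pre_custom_encrypt plaintext key) := by unfold Pre_custom_encrypt; infer_instance
def pvWitness_custom_encrypt : String × String := ("hello", "k")

def Spec_custom_encrypt (plaintext : String) (key : String) (out : String) : Prop := out = custom_encrypt_alt plaintext key
instance (plaintext : String) (key : String) (out : String) : Decidable (Spec_custom_encrypt plaintext key out) := by unfold Spec_custom_encrypt; infer_instance

-- ===== CLAIM (what is proved, stated in full; the proofs are below) =====
def Claim_equal_custom_encrypt : Prop := ∀ (plaintext : String) (key : String), Dom_custom_encrypt plaintext key → Pre_custom_encrypt plaintext key → Spec_custom_encrypt plaintext key (custom_encrypt plaintext key)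

-- ===== LEMMAS AND PROOFS =====

theorem toNat_ofNat_lt (m : Nat) (h : m < 256) : (Char.ofNat m).toNat = m := by
  rw [Char.toNat_ofNat, if_pos]
  exact Or.inl (by omega)

-- the round loop is a map over zipIdx
theorem encRound_eq_map (ks : List Nat) (r : Nat) (pt : List Char) :
    encRound ks r pt =
      pt.zipIdx.map (fun ci => Char.ofNat ((ci.1.toNat ^^^ ks.getD ((ci.2 + r) % ks.length) 0) % 256)) := by
  unfold encRound
  rw [PySem.List.foldl_append_singleton_eq_map]
  simp

theorem encRound_length (ks : List Nat) (r : Nat) (pt : List Char) :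
    (encRound ks r pt).length = pt.length := by
  rw [encRound_eq_map]; simp

theorem encRound_getElem (ks : List Nat) (r : Nat) (pt : List Char) (i : Nat)
    (h : i < pt.length) :
    (encRound ks r pt)[i]'(by rw [encRound_length]; exact h) =
      Char.ofNat ((pt[i].toNat ^^^ ks.getD ((i + r) % ks.length) 0) % 256) := by
  simp [encRound_eq_map]

-- the core arithmetic fact: folding the three masked XOR rounds equals one
-- XOR with the masked threefold XOR of the keys (true for every p)
theorem mask_xor3 (p a b c : Nat) :
    ((((p ^^^ a) % 256 ^^^ b) % 256) ^^^ c) % 256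
      = (p ^^^ ((a ^^^ b ^^^ c) &&& 255)) &&& 255 := by
  have h256 : (256 : Nat) = 2 ^ 8 := by norm_num
  have h255 : (255 : Nat) = 2 ^ 8 - 1 := by norm_num
  apply Nat.eq_of_testBit_eq
  intro j
  simp only [h256, h255, Nat.testBit_mod_two_pow, Nat.testBit_xor, Nat.testBit_and,
    Nat.testBit_two_pow_sub_one]
  by_cases hj : j < 8 <;> simp [hj]


-- length of a foldl that appends one (accumulator-dependent) element per step
theorem foldl_append_dep_length {α β : Type} (g : List β → α → β) :
    ∀ (l : List α) (acc : List β),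
      (l.foldl (fun acc x => acc ++ [g acc x]) acc).length = acc.length + l.length := by
  intro l
  induction l with
  | nil => simp
  | cons x xs ih => intro acc; simp [ih]; omega

theorem ks_length (key : String) : 256 ≤ (generate_key_schedule key).length := by
  unfold generate_key_schedule
  rw [foldl_append_dep_length (fun acc i => (acc.getD (i - key.toList.length) 0 + acc.getD (i - 1) 0) % 256),
    foldl_append_dep_length (fun _ i => (key.toList.getD i 'a').toNat + i)]
  simp [List.length_range']
  omega

theorem getElem_flatten_replicate {α : Type} (comb : List α) (hL : 0 < comb.length) :
    ∀ (k i : Nat) (h : i < ((List.replicate k comb).flatten).length),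
      ((List.replicate k comb).flatten)[i] =
        comb[i % comb.length]'(Nat.mod_lt _ hL) := by
  intro k
  induction k with
  | zero => intro i h; simp at h
  | succ m ih =>
    intro i h
    simp only [List.replicate_succ, List.flatten_cons]
    simp only [List.replicate_succ, List.flatten_cons, List.length_append] at h
    by_cases hi : i < comb.length
    · rw [List.getElem_append_left hi]
      congr 1
      exact (Nat.mod_eq_of_lt hi).symm
    · push_neg at hi
      rw [List.getElem_append_right hi]
      rw [ih (i - comb.length) (by omega)]
      congr 1
      rw [Nat.mod_eq_sub_mod hi]

theorem length_flatten_replicate {α : Type} (comb : List α) (k : Nat) :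
    ((List.replicate k comb).flatten).length = k * comb.length := by
  induction k with
  | zero => simp
  | succ m ih => rw [List.replicate_succ, List.flatten_cons, List.length_append, ih]; ring

-- ===== VERDICT (by name: the statement is the Claim_ definition above) =====
theorem custom_encrypt_spec : Claim_equal_custom_encrypt := by
  intro plaintext key _hDom _hPre
  unfold Spec_custom_encrypt custom_encrypt custom_encrypt_alt
  dsimp only
  set ks := generate_key_schedule key with hks
  set L := ks.length with hL
  set pt := plaintext.toList with hpt
  have hL0 : 0 < L := lt_of_lt_of_le (by norm_num) (ks_length key)
  have hL2 : 2 < L := lt_of_lt_of_le (by norm_num) (ks_length key)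
  have hstream : pt.length ≤
      ((List.replicate (pt.length / L + 1)
        ((List.range L).map (fun i =>
          (ks.getD i 0 ^^^ ks.getD ((i + 1) % L) 0 ^^^ ks.getD ((i + 2) % L) 0) &&& 255))).flatten).length := by
    rw [length_flatten_replicate, List.length_map, List.length_range]
    have h1 := Nat.div_add_mod pt.length L
    have h2 := Nat.mod_lt pt.length hL0
    calc pt.length = L * (pt.length / L) + pt.length % L := h1.symm
      _ ≤ L * (pt.length / L) + L := by omega
      _ = (pt.length / L + 1) * L := by ring
  congr 1
  congr 1
  apply List.ext_getElem
  · rw [encRound_length, encRound_length, encRound_length, List.length_map,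
      List.length_zip, List.length_map]
    omega
  · intro i h1 h2
    have hi : i < pt.length := by
      simpa [encRound_length] using h1
    have g2 : i < (encRound ks 1 (encRound ks 0 pt)).length := by
      simpa [encRound_length] using hi
    have g1 : i < (encRound ks 0 pt).length := by
      simpa [encRound_length] using hi
    rw [encRound_getElem ks 2 _ i g2, encRound_getElem ks 1 _ i g1,
      encRound_getElem ks 0 pt i hi]
    rw [toNat_ofNat_lt _ (Nat.mod_lt _ (by norm_num)),
      toNat_ofNat_lt _ (Nat.mod_lt _ (by norm_num))]
    simp only [List.getElem_map, List.getElem_zip]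
    rw [getElem_flatten_replicate _ (by simpa using hL0)]
    simp only [List.getElem_map, List.getElem_range, List.length_map, List.length_range]
    rw [mask_xor3, Nat.add_zero]
    have e1 : (i % L + 1) % L = (i + 1) % L := by
      rw [Nat.add_mod i 1 L, Nat.mod_eq_of_lt (show 1 < L from by omega)]
    have e2 : (i % L + 2) % L = (i + 2) % L := by
      rw [Nat.add_mod i 2 L, Nat.mod_eq_of_lt hL2]
    rw [e1, e2]
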